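-- pv_equiv track=rewrite | github.com/converged-computing/flux-apps-helm | base-template/docker/bcc-sidecar/programs/tcp/run_ebpf_collect.py | get_byte_bucket_label
-- ===== SOURCE A (Python) =====
-- BYTE_BUCKETS = [
--     (0, 1024, "0B-1KB"),
--     (1025, 16 * 1024, "1KB-16KB"),
--     (16 * 1024 + 1, 64 * 1024, "16KB-64KB"),
--     (64 * 1024 + 1, 256 * 1024, "64KB-256KB"),
--     (256 * 1024 + 1, 1024 * 1024, "256KB-1MB"),
-- ]
--
-- LARGE_BUCKET_THRESHOLD = 1024 * 1024
--
-- LARGE_BUCKET_LABEL = "GT_1MB"  # Greater than 1MB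
--
-- def get_byte_bucket_label(bytes_count):
--     if bytes_count < 0:  # Error or irrelevant
--         return "INVALID"
--     for lower, upper, label in BYTE_BUCKETS:
--         if lower <= bytes_count <= upper:
--             return label
--     if bytes_count > LARGE_BUCKET_THRESHOLD:
--         return LARGE_BUCKET_LABEL
--     # This case should ideally be covered by the last bucket or threshold
--     return "OTHER"
-- ===== SOURCE B (Python) =====
-- _UPPERS = [1024, 16384, 65536, 262144, 1048576]
-- _LABELS = ["0B-1KB", "1KB-16KB", "16KB-64KB", "64KB-256KB", "256KB-1MB"]
--
--
-- def get_byte_bucket_label(bytes_count):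
--     if bytes_count < 0:
--         return "INVALID"
--     # binary search (bisect_left) for the first upper bound >= bytes_count
--     lo, hi = 0, len(_UPPERS)
--     while lo < hi:
--         mid = (lo + hi) // 2
--         if _UPPERS[mid] < bytes_count:
--             lo = mid + 1
--         else:
--             hi = mid
--     if lo < len(_LABELS):
--         return _LABELS[lo]
--     return "GT_1MB"
-- ===== Notes on version B (the rewrite author's own statement) =====
-- stated objective: idiomatic
-- what changed: Replaces the sequential scan of (lower, upper, label) triples with a bisect_left-style binary search over a list of upper bounds paired with a parallel label list; the unreachable 'OTHER' fallback disappears.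
import Mathlib
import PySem

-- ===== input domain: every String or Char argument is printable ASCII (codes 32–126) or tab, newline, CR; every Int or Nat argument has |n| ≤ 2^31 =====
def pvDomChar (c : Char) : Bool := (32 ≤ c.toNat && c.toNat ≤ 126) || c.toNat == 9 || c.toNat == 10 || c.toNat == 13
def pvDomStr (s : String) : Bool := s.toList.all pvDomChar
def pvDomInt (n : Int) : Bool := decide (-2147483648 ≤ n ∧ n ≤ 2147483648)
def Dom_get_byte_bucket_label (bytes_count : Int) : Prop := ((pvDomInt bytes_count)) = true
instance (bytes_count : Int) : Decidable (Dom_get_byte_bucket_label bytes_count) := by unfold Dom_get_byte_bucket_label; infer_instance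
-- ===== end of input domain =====

-- B replaces A's linear scan over bucket triples with a bisect_left binary search over upper bounds (idiomatic/alternative; same results).


-- ===== PORT A =====
def pvBuckets : List (Int × Int × String) :=
  [(0, 1024, "0B-1KB"),
   (1025, 16384, "1KB-16KB"),
   (16385, 65536, "16KB-64KB"),
   (65537, 262144, "64KB-256KB"),
   (262145, 1048576, "256KB-1MB")]

-- the for-loop over BYTE_BUCKETS, returning on the first matching bucket
def pvALoop (bs : List (Int × Int × String)) (b : Int) : String :=
  match bs with
  | [] => if b > 1048576 then "GT_1MB" else "OTHER"
  | (lower, upper, label) :: rest =>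
      if lower ≤ b ∧ b ≤ upper then label else pvALoop rest b

def get_byte_bucket_label (bytes_count : Int) : String :=
  if bytes_count < 0 then "INVALID" else pvALoop pvBuckets bytes_count


-- ===== PORT B =====
def pvUppers : List Int := [1024, 16384, 65536, 262144, 1048576]
def pvLabels : List String := ["0B-1KB", "1KB-16KB", "16KB-64KB", "64KB-256KB", "256KB-1MB"]

-- the while-loop binary search (bisect_left); fuel = hi - lo at entry bounds the iterations
def pvBisectGo : Nat → Int → Nat → Nat → Nat
  | 0, _, lo, _ => lo
  | fuel + 1, x, lo, hi =>
      if lo < hi then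
        let mid := (lo + hi) / 2
        if pvUppers.getD mid 0 < x then pvBisectGo fuel x (mid + 1) hi
        else pvBisectGo fuel x lo mid
      else lo

def get_byte_bucket_label_alt (bytes_count : Int) : String :=
  if bytes_count < 0 then "INVALID" else
    let idx := pvBisectGo pvUppers.length bytes_count 0 pvUppers.length
    if idx < pvLabels.length then pvLabels.getD idx "" else "GT_1MB"


-- ===== PRECONDITION & SPEC =====
def Spec_get_byte_bucket_label (bytes_count : Int) (out : String) : Prop := out = get_byte_bucket_label_alt bytes_count
instance (bytes_count : Int) (out : String) : Decidable (Spec_get_byte_bucket_label bytes_count out) := by unfold Spec_get_byte_bucket_label; infer_instance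

-- ===== CLAIM (what is proved, stated in full; the proofs are below) =====
def Claim_equal_get_byte_bucket_label : Prop := ∀ (bytes_count : Int), Dom_get_byte_bucket_label bytes_count → Spec_get_byte_bucket_label bytes_count (get_byte_bucket_label bytes_count)

-- ===== LEMMAS AND PROOFS =====

-- ===== VERDICT (by name: the statement is the Claim_ definition above) =====
theorem get_byte_bucket_label_spec : Claim_equal_get_byte_bucket_label := by
  intro b _
  unfold Spec_get_byte_bucket_label get_byte_bucket_label get_byte_bucket_label_alt
  simp only [pvALoop, pvBuckets, pvBisectGo, pvUppers, pvLabels, List.length, List.getD,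
    List.getElem?_cons_zero, List.getElem?_cons_succ, Option.getD_some]
  norm_num
  split_ifs <;> first | rfl | omega
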